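-- pv_equiv track=rewrite | github.com/GitMonsters/octotetrahedral-agi | arc-puzzle-catalog/re-arc/solves/2d532295/solver.py | transform
-- ===== SOURCE A (Python) =====
-- from collections import Counter
--
-- def transform(grid):
--     rows = len(grid)
--     cols = len(grid[0])
--
--     counts = Counter(grid[r][c] for r in range(rows) for c in range(cols))
--
--     # Find marker color: exactly 4 pixels forming rectangle corners
--     marker_color = None
--     marker_positions = []
--     for color, cnt in sorted(counts.items(), key=lambda x: x[1]):
--         if cnt == 4:
--             positions = [(r,c) for r in range(rows) for c in range(cols) if grid[r][c] == color]
--             rs = sorted(set(r for r,c in positions))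
--             cs = sorted(set(c for r,c in positions))
--             if len(rs) == 2 and len(cs) == 2:
--                 # Check all 4 corners exist
--                 if all((r,c) in [(p[0],p[1]) for p in positions] for r in rs for c in cs):
--                     marker_color = color
--                     marker_positions = positions
--                     break
--
--     bg = counts.most_common(1)[0][0]
--
--     if marker_color is not None:
--         # Extract interior
--         rs = sorted(set(r for r,c in marker_positions))
--         cs = sorted(set(c for r,c in marker_positions))
--         r1, r2 = rs[0]+1, rs[1]-1
--         c1, c2 = cs[0]+1, cs[1]-1
--
--         # Find pattern color
--         pattern_color = None
--         for color in counts: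
--             if color != bg and color != marker_color:
--                 pattern_color = color
--                 break
--
--         out = []
--         for r in range(r1, r2+1):
--             row = []
--             for c in range(c1, c2+1):
--                 v = grid[r][c]
--                 if pattern_color is not None and v == pattern_color:
--                     row.append(marker_color)
--                 else:
--                     row.append(v)
--             out.append(row)
--         return out
--     else:
--         # No markers: find the pattern area, return all bg
--         # Find the bounding box of the non-bg pattern
--         non_bg = [(r,c) for r in range(rows) for c in range(cols) if grid[r][c] != bg]
--         if non_bg:
--             min_r = min(r for r,c in non_bg)
--             max_r = max(r for r,c in non_bg)
--             min_c = min(c for r,c in non_bg)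
--             max_c = max(c for r,c in non_bg)
--             h = max_r - min_r + 1
--             w = max_c - min_c + 1
--             return [[bg]*w for _ in range(h)]
--         else:
--             return [row[:] for row in grid]
-- ===== SOURCE B (Python) =====
-- def transform(grid):
--     rows, cols = len(grid), len(grid[0])
--     # one pass: color -> [count, row set, col set, min_r, max_r, min_c, max_c]
--     info = {}
--     for r in range(rows):
--         for c in range(cols):
--             v = grid[r][c]
--             e = info.get(v)
--             if e is None:
--                 info[v] = [1, {r}, {c}, r, r, c, c]
--             else:
--                 e[0] += 1
--                 e[1].add(r)
--                 e[2].add(c)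
--                 if r < e[3]: e[3] = r
--                 if r > e[4]: e[4] = r
--                 if c < e[5]: e[5] = c
--                 if c > e[6]: e[6] = c
--     bg = max(info, key=lambda k: info[k][0])
--     # marker: 4 cells on exactly 2 rows and 2 cols are necessarily the 4 corners
--     marker = None
--     for color, e in info.items():
--         if e[0] == 4 and len(e[1]) == 2 and len(e[2]) == 2:
--             marker = color
--             r1, r2, c1, c2 = e[3] + 1, e[4] - 1, e[5] + 1, e[6] - 1
--             break
--     if marker is not None:
--         pattern = next((k for k in info if k != bg and k != marker), None)
--         return [[marker if v == pattern else v for v in grid[r][c1:c2 + 1]]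
--                 for r in range(r1, r2 + 1)]
--     others = [e for color, e in info.items() if color != bg]
--     if others:
--         h = max(e[4] for e in others) - min(e[3] for e in others) + 1
--         w = max(e[6] for e in others) - min(e[5] for e in others) + 1
--         return [[bg] * w for _ in range(h)]
--     return [list(row) for row in grid]
-- ===== Notes on version B (the rewrite author's own statement) =====
-- stated objective: alternative
-- what changed: B keeps no position lists: one pass builds per-color summaries (count, row set, col set, min/max row/col) and the marker test becomes count==4 with 2 distinct rows and 2 distinct columns (the corner scan disappears, since 4 distinct cells on 2 rows and 2 columns are necessarily the corners); background, pattern and the no-marker bounding box are read off the same summaries, removing A's count-sort and per-candidate grid rescans.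
import Mathlib
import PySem

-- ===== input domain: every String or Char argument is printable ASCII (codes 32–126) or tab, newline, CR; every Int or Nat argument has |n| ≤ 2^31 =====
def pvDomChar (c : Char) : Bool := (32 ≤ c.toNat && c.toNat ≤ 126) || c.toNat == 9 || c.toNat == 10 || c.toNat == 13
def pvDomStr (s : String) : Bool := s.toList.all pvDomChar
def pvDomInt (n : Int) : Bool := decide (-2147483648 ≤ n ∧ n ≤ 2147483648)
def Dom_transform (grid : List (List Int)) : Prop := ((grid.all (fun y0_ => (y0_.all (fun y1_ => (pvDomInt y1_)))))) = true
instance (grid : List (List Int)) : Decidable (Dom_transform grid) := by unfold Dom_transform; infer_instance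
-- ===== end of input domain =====

-- B replaces A's position lists, count-sort and per-candidate grid rescans by a single
-- pass keeping only per-color summaries (count, row/col sets, min/max coordinates); the
-- corner test follows from count = 4 with 2 distinct rows and 2 distinct columns.
-- Return value only (neither version mutates its argument).

-- ===== PORT A =====
def aVal (grid : List (List Int)) (r c : Int) : Int :=
  PySem.List.pyGetD (PySem.List.pyGetD grid r []) c 0

def aCells (grid : List (List Int)) : List Int :=
  (PySem.List.pyRange 0 (grid.length : Int)).flatMap (fun r =>
    (PySem.List.pyRange 0 ((PySem.List.pyGetD grid 0 []).length : Int)).map (fun c =>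
      aVal grid r c))

def aPositions (grid : List (List Int)) (color : Int) : List (Int × Int) :=
  (PySem.List.pyRange 0 (grid.length : Int)).flatMap (fun r =>
    ((PySem.List.pyRange 0 ((PySem.List.pyGetD grid 0 []).length : Int)).filter (fun c =>
      aVal grid r c == color)).map (fun c => (r, c)))

-- body of A's marker-search loop (one iteration; `none` = fall through to the next item)
def aCheckBody (grid : List (List Int)) (p : Int × Int) : Option (Int × List (Int × Int)) :=
  if p.2 == 4 then
    let positions := aPositions grid p.1
    let rs := PySem.List.sorted (PySem.Set.ofList (positions.map (fun q => q.1))) (fun x => x)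
    let cs := PySem.List.sorted (PySem.Set.ofList (positions.map (fun q => q.2))) (fun x => x)
    if rs.length == 2 && cs.length == 2 then
      if rs.all (fun r => cs.all (fun c => (positions.map (fun q => (q.1, q.2))).contains (r, c))) then
        some (p.1, positions)
      else none
    else none
  else none

def aFound? (grid : List (List Int)) : Option (Int × List (Int × Int)) :=
  (PySem.List.sorted (PySem.Dict.counter (aCells grid)).items (fun p => p.2)).findSome?
    (aCheckBody grid)

-- counts.most_common(1)[0][0]; `.getD 0` is the IndexError path, excluded by Pre_
def aBg (grid : List (List Int)) : Int :=
  ((PySem.List.max? (PySem.Dict.counter (aCells grid)).items (fun p => p.2)).map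
    (fun p => p.1)).getD 0

def transform (grid : List (List Int)) : List (List Int) :=
  let bg := aBg grid
  match aFound? grid with
  | some (markerColor, markerPositions) =>
    let rs := PySem.List.sorted (PySem.Set.ofList (markerPositions.map (fun q => q.1))) (fun x => x)
    let cs := PySem.List.sorted (PySem.Set.ofList (markerPositions.map (fun q => q.2))) (fun x => x)
    let r1 := PySem.List.pyGetD rs 0 0 + 1
    let r2 := PySem.List.pyGetD rs 1 0 - 1
    let c1 := PySem.List.pyGetD cs 0 0 + 1
    let c2 := PySem.List.pyGetD cs 1 0 - 1
    let pattern? := (PySem.Dict.counter (aCells grid)).keys.find? (fun color =>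
      !(color == bg) && !(color == markerColor))
    (PySem.List.pyRange r1 (r2 + 1)).foldl (fun out r =>
      out ++ [(PySem.List.pyRange c1 (c2 + 1)).foldl (fun row c =>
        if pattern? == some (aVal grid r c) then row ++ [markerColor]
        else row ++ [aVal grid r c]) []]) []
  | none =>
    let nonBg : List (Int × Int) :=
      (PySem.List.pyRange 0 (grid.length : Int)).flatMap (fun r =>
        ((PySem.List.pyRange 0 ((PySem.List.pyGetD grid 0 []).length : Int)).filter (fun c =>
          !(aVal grid r c == bg))).map (fun c => (r, c)))
    if !nonBg.isEmpty then
      let minR := (PySem.List.min? (nonBg.map (fun q => q.1)) (fun x => x)).getD 0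
      let maxR := (PySem.List.max? (nonBg.map (fun q => q.1)) (fun x => x)).getD 0
      let minC := (PySem.List.min? (nonBg.map (fun q => q.2)) (fun x => x)).getD 0
      let maxC := (PySem.List.max? (nonBg.map (fun q => q.2)) (fun x => x)).getD 0
      (PySem.List.pyRange 0 (maxR - minR + 1)).map (fun _ =>
        PySem.List.pyRepeat [bg] (maxC - minC + 1))
    else
      grid.map (fun row => PySem.List.slice row none none)

-- ===== PORT B =====
-- per-color summary: (count, row set, col set, min_r, max_r, min_c, max_c)
abbrev BEnt : Type := Int × PySem.Set Int × PySem.Set Int × Int × Int × Int × Int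

def bDef : BEnt := (0, PySem.Set.empty, PySem.Set.empty, 0, 0, 0, 0)

-- info[v] = [1, {r}, {c}, r, r, c, c]
def bInit (r c : Int) : BEnt :=
  (1, PySem.Set.ofList [r], PySem.Set.ofList [c], r, r, c, c)

-- the in-place update of an existing entry
def bUpd (e : BEnt) (r c : Int) : BEnt :=
  (e.1 + 1, PySem.Set.add e.2.1 r, PySem.Set.add e.2.2.1 c,
   if r < e.2.2.2.1 then r else e.2.2.2.1,
   if e.2.2.2.2.1 < r then r else e.2.2.2.2.1,
   if c < e.2.2.2.2.2.1 then c else e.2.2.2.2.2.1,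
   if e.2.2.2.2.2.2 < c then c else e.2.2.2.2.2.2)

def bInfo (grid : List (List Int)) : PySem.Dict Int BEnt :=
  (PySem.List.pyRange 0 (grid.length : Int)).foldl (fun d r =>
    (PySem.List.pyRange 0 ((PySem.List.pyGetD grid 0 []).length : Int)).foldl (fun d c =>
      let v := PySem.List.pyGetD (PySem.List.pyGetD grid r []) c 0
      match d.get? v with
      | none => d.insert v (bInit r c)
      | some e => d.insert v (bUpd e r c)) d) PySem.Dict.empty

def bBg (grid : List (List Int)) : Int :=
  (PySem.List.max? (bInfo grid).keys (fun k => ((bInfo grid).getD k bDef).1)).getD 0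

-- first color with 4 cells on exactly 2 rows and 2 columns (necessarily the 4 corners)
def bMarker? (grid : List (List Int)) : Option (Int × Int × Int × Int × Int) :=
  (bInfo grid).items.findSome? (fun p =>
    if p.2.1 == 4 && PySem.Set.len p.2.2.1 == 2 && PySem.Set.len p.2.2.2.1 == 2 then
      some (p.1, p.2.2.2.2)
    else none)

def transform_alt (grid : List (List Int)) : List (List Int) :=
  let bg := bBg grid
  match bMarker? grid with
  | some (mk, mnr, mxr, mnc, mxc) =>
    let r1 := mnr + 1
    let r2 := mxr - 1
    let c1 := mnc + 1
    let c2 := mxc - 1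
    let pattern? := (bInfo grid).keys.find? (fun k => !(k == bg) && !(k == mk))
    (PySem.List.pyRange r1 (r2 + 1)).map (fun r =>
      (PySem.List.slice (PySem.List.pyGetD grid r []) (some c1) (some (c2 + 1))).map
        (fun v => if pattern? == some v then mk else v))
  | none =>
    let others := ((bInfo grid).items.filter (fun p => !(p.1 == bg))).map (fun p => p.2)
    if !others.isEmpty then
      let h := (PySem.List.max? (others.map (fun e => e.2.2.2.2.1)) (fun x => x)).getD 0 -
               (PySem.List.min? (others.map (fun e => e.2.2.2.1)) (fun x => x)).getD 0 + 1
      let w := (PySem.List.max? (others.map (fun e => e.2.2.2.2.2.2)) (fun x => x)).getD 0 -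
               (PySem.List.min? (others.map (fun e => e.2.2.2.2.2.1)) (fun x => x)).getD 0 + 1
      (PySem.List.pyRange 0 h).map (fun _ => PySem.List.pyRepeat [bg] w)
    else
      grid.map (fun row => row)

-- ===== PRECONDITION & SPEC =====
-- Pre_ excludes exactly the inputs where A raises: the empty grid and a zero-length first
-- row (IndexError on grid[0] / most_common(1)[0]) and rows shorter than row 0 (IndexError
-- on grid[r][c]).
def Pre_transform (grid : List (List Int)) : Prop :=
  grid ≠ [] ∧ 0 < (PySem.List.pyGetD grid 0 []).length ∧
    ∀ row ∈ grid, (PySem.List.pyGetD grid 0 []).length ≤ row.length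
instance (grid : List (List Int)) : Decidable (Pre_transform grid) := by
  unfold Pre_transform; infer_instance

def pvWitness_transform : List (List Int) :=
  [[8, 0, 0, 8], [0, 2, 0, 0], [0, 0, 2, 0], [8, 0, 0, 8]]

def Spec_transform (grid : List (List Int)) (out : List (List Int)) : Prop := out = transform_alt grid
instance (grid : List (List Int)) (out : List (List Int)) : Decidable (Spec_transform grid out) := by
  unfold Spec_transform; infer_instance

-- ===== CLAIM (what is proved, stated in full; the proofs are below) =====
def Claim_equal_transform : Prop :=
  ∀ (grid : List (List Int)), Dom_transform grid → Pre_transform grid →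
    Spec_transform grid (transform grid)

-- ===== LEMMAS AND PROOFS =====

-- ---- proof-only abbreviations ----
def pvCols (grid : List (List Int)) : Int := ((PySem.List.pyGetD grid 0 []).length : Int)

def pvPairs (grid : List (List Int)) : List (Int × (Int × Int)) :=
  (PySem.List.pyRange 0 (grid.length : Int)).flatMap (fun r =>
    (PySem.List.pyRange 0 (pvCols grid)).map (fun c => (aVal grid r c, (r, c))))

-- positions of color k, in row-major order
def pvPs (grid : List (List Int)) (k : Int) : List (Int × Int) :=
  ((pvPairs grid).filter (fun p => p.1 == k)).map (fun p => p.2)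

-- running min / max of a nonempty Int list (0 on [])
def pvFMin (a : Int) (l : List Int) : Int := l.foldl (fun m y => if y < m then y else m) a
def pvFMax (a : Int) (l : List Int) : Int := l.foldl (fun m y => if m < y then y else m) a

def pvMinL : List Int → Int
  | [] => 0
  | x :: t => pvFMin x t

def pvMaxL : List Int → Int
  | [] => 0
  | x :: t => pvFMax x t

-- the per-color summary as a function of the position list
def pvStats : List (Int × Int) → BEnt
  | [] => bDef
  | q :: t => t.foldl (fun e q' => bUpd e q'.1 q'.2) (bInit q.1 q.2)

-- B's fold over an explicit pair list (proof-only reshaping of bInfo)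
def pvGI (L : List (Int × (Int × Int))) : PySem.Dict Int BEnt :=
  L.foldl (fun d p =>
    match d.get? p.1 with
    | none => d.insert p.1 (bInit p.2.1 p.2.2)
    | some e => d.insert p.1 (bUpd e p.2.1 p.2.2)) PySem.Dict.empty

-- the common candidate tests
-- A's rectangle test, as a Bool (the boolean A's nested ifs compute)
def pvRectA (grid : List (List Int)) (k : Int) : Bool :=
  let positions := aPositions grid k
  let rs := PySem.List.sorted (PySem.Set.ofList (positions.map (fun q => q.1))) (fun x => x)
  let cs := PySem.List.sorted (PySem.Set.ofList (positions.map (fun q => q.2))) (fun x => x)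
  (rs.length == 2 && cs.length == 2) &&
    rs.all (fun r => cs.all (fun c => (positions.map (fun q => (q.1, q.2))).contains (r, c)))

def pvQ (grid : List (List Int)) (k : Int) : Bool :=
  (((aCells grid).count k : Int) == 4) && pvRectA grid k

def pvQB (grid : List (List Int)) (k : Int) : Bool :=
  ((bInfo grid).getD k bDef).1 == 4 &&
    PySem.Set.len ((bInfo grid).getD k bDef).2.1 == 2 &&
    PySem.Set.len ((bInfo grid).getD k bDef).2.2.1 == 2

-- ---- generic list lemmas (kept from the shared toolbox) ----
theorem pvFoldl_flatMap {α β γ : Type} (g : α → List β) (f : γ → β → γ) :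
    ∀ (l : List α) (init : γ),
      (l.flatMap g).foldl f init = l.foldl (fun acc a => (g a).foldl f acc) init := by
  intro l
  induction l with
  | nil => intro init; rfl
  | cons x xs ih => intro init; simp [List.flatMap_cons, List.foldl_append, ih]

theorem pvFindSome?_guard {α β : Type} (p : α → Bool) (g : α → β) :
    ∀ l : List α,
      l.findSome? (fun x => if p x then some (g x) else none) = (l.find? p).map g := by
  intro l; induction l with
  | nil => rfl
  | cons x xs ih =>
    cases h : p x <;> simp [h, ih]

theorem pvFindSome?_congr {α β : Type} {f g : α → Option β} :
    ∀ l : List α, (∀ x ∈ l, f x = g x) → l.findSome? f = l.findSome? g := by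
  intro l; induction l with
  | nil => intro _; rfl
  | cons x xs ih =>
    intro h
    rw [List.findSome?_cons, List.findSome?_cons, h x (by simp),
      ih (fun y hy => h y (by simp [hy]))]

theorem pvFind?_filter {α : Type} (K Q : α → Bool) :
    ∀ l : List α, (l.filter K).find? Q = l.find? (fun x => K x && Q x) := by
  intro l; induction l with
  | nil => rfl
  | cons x xs ih =>
    cases hK : K x
    · simp [hK, ih]
    · cases hQ : Q x <;> simp [hK, hQ, ih]

theorem pvFind?_congr {α : Type} {p q : α → Bool} :
    ∀ l : List α, (∀ x ∈ l, p x = q x) → l.find? p = l.find? q := by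
  intro l; induction l with
  | nil => intro _; rfl
  | cons x xs ih =>
    intro h
    rw [List.find?_cons, List.find?_cons, h x (by simp)]
    cases q x <;> simp [ih (fun y hy => h y (by simp [hy]))]

theorem pvIf_nest3 {β : Type} (b c d : Bool) (v : β) :
    (if b = true then
      (if c = true then (if d = true then some v else none) else none) else none) =
      (if (b && (c && d)) = true then some v else none) := by
  cases b <;> cases c <;> cases d <;> simp

-- stability of Python's sort: filtering one key class commutes with sorting
theorem pvFilter_insertBy {α : Type} (key : α → Int) (k : Int) (x : α) :
    ∀ ys : List α, ys.Pairwise (fun a b => key a ≤ key b) →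
      (PySem.List.insertBy (fun a b => decide (key a < key b)) x ys).filter (fun y => key y == k) =
        if key x == k then ys.filter (fun y => key y == k) ++ [x]
        else ys.filter (fun y => key y == k) := by
  intro ys
  induction ys with
  | nil =>
    intro _
    by_cases h : key x = k <;> simp [PySem.List.insertBy, h]
  | cons y ys ih =>
    intro hp
    rw [List.pairwise_cons] at hp
    by_cases hlt : key x < key y
    · have h1 : PySem.List.insertBy (fun a b => decide (key a < key b)) x (y :: ys) =
          x :: y :: ys := by
        simp [PySem.List.insertBy, hlt]
      rw [h1]
      by_cases hxk : key x = k
      · have hnil : (y :: ys).filter (fun y => key y == k) = [] := by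
          rw [List.filter_eq_nil_iff]
          intro a ha
          have hya : key y ≤ key a := by
            rcases List.mem_cons.mp ha with rfl | ha'
            · exact le_refl _
            · exact hp.1 a ha'
          simp only [beq_iff_eq]
          omega
        simp [hxk, hnil]
      · have hxk' : (key x == k) = false := by simp [hxk]
        simp [List.filter_cons, hxk']
    · have h1 : PySem.List.insertBy (fun a b => decide (key a < key b)) x (y :: ys) =
          y :: PySem.List.insertBy (fun a b => decide (key a < key b)) x ys := by
        simp [PySem.List.insertBy, hlt]
      rw [h1, List.filter_cons, List.filter_cons, ih hp.2]
      by_cases hyk : (key y == k) = true <;> by_cases hxk : (key x == k) = true <;>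
        simp [hyk, hxk]

theorem pvFilter_sortedG {α : Type} (key : α → Int) (k : Int) (l : List α) :
    (PySem.List.sorted l key).filter (fun y => key y == k) = l.filter (fun y => key y == k) := by
  induction l using List.reverseRecOn with
  | nil => simp [PySem.List.sorted]
  | append_singleton l x ih =>
    have h1 : PySem.List.sorted (l ++ [x]) key =
        PySem.List.insertBy (fun a b => decide (key a < key b)) x (PySem.List.sorted l key) := by
      rw [PySem.List.sorted_eq_foldl_insertBy, PySem.List.sorted_eq_foldl_insertBy,
        List.foldl_append]
      rfl
    rw [h1, pvFilter_insertBy key k x _ (PySem.List.sorted_pairwise l key), List.filter_append, ih]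
    by_cases hx : (key x == k) = true <;> simp [hx]

theorem pvFilter_sorted (l : List (Int × Int)) :
    (PySem.List.sorted l (fun p => p.2)).filter (fun p => p.2 == 4) =
      l.filter (fun p => p.2 == 4) :=
  pvFilter_sortedG (fun p => p.2) 4 l

-- max? over a mapped list
theorem pvMax?_map {α β κ : Type} [LT κ] [DecidableLT κ] (f : α → β) (key : β → κ)
    (l : List α) :
    PySem.List.max? (l.map f) key = (PySem.List.max? l (fun x => key (f x))).map f := by
  unfold PySem.List.max?
  rw [List.foldl_map]
  suffices h : ∀ (acc : Option α),
      l.foldl (fun acc x => match acc with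
        | none => some (f x)
        | some m => if key m < key (f x) then some (f x) else some m) (acc.map f) =
      (l.foldl (fun acc x => match acc with
        | none => some x
        | some m => if key (f m) < key (f x) then some x else some m) acc).map f by
    simpa using h none
  induction l with
  | nil => intro acc; rfl
  | cons x xs ih =>
    intro acc
    cases acc with
    | none => simpa using ih (some x)
    | some m =>
      by_cases hc : key (f m) < key (f x)
      · simpa [hc] using ih (some x)
      · simpa [hc] using ih (some m)

-- a Nat-valued key compared through Int casts is the same key
theorem pvMax?_cast {α : Type} (g : α → Nat) (l : List α) :
    PySem.List.max? l (fun x => ((g x : Nat) : Int)) = PySem.List.max? l g := by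
  unfold PySem.List.max?
  apply PySem.List.foldl_congr_mem
  intro acc x _
  cases acc with
  | none => rfl
  | some m => simp [Nat.cast_lt]

theorem pvSlice_none_none {α : Type} (row : List α) :
    PySem.List.slice row none none = row := by
  simp [PySem.List.slice]

-- a slice with in-range bounds is the corresponding index loop
theorem pvSlice_eq_map (row : List Int) (a b : Int) (h0 : 0 ≤ a) (hab : a ≤ b)
    (hb : b ≤ (row.length : Int)) :
    PySem.List.slice row (some a) (some b) =
      (PySem.List.pyRange a b).map (fun c => PySem.List.pyGetD row c 0) := by
  have ha' : PySem.List.clampIdx row.length a = a.toNat := by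
    unfold PySem.List.clampIdx
    rw [if_neg (by omega)]
    omega
  have hb' : PySem.List.clampIdx row.length b = b.toNat := by
    unfold PySem.List.clampIdx
    rw [if_neg (by omega)]
    omega
  have hcount : (if a < b then ((b - a + 1 - 1) / 1).toNat else 0) = (b - a).toNat := by
    split
    · simp
    · omega
  have hrange : PySem.List.pyRange a b =
      (List.range (b - a).toNat).map (fun (k : Nat) => a + 1 * ((k : Nat) : Int)) := by
    rw [PySem.List.pyRange_of_pos a b (by omega : (0:Int) < 1), hcount]
  unfold PySem.List.slice
  simp only [ha', hb']
  rw [hrange, List.map_map]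
  apply List.ext_getElem
  · simp only [List.length_take, List.length_drop, List.length_map, List.length_range]
    omega
  · intro i h₁ h₂
    simp only [List.length_take, List.length_drop] at h₁
    simp only [List.getElem_take, List.getElem_drop, List.getElem_map, List.getElem_range,
      Function.comp_apply]
    rw [PySem.List.pyGetD_eq_getElem row 0 (by omega) (by omega)]
    congr 1
    omega

-- ---- facts about the shared cell enumeration ----
theorem pvPairs_map_fst (grid : List (List Int)) :
    (pvPairs grid).map (fun p => p.1) = aCells grid := by
  unfold pvPairs aCells pvCols
  simp [List.map_flatMap, List.map_map, Function.comp_def]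

theorem pvPairs_filterq (grid : List (List Int)) (q : Int → Bool) :
    (PySem.List.pyRange 0 (grid.length : Int)).flatMap (fun r =>
      ((PySem.List.pyRange 0 (pvCols grid)).filter (fun c => q (aVal grid r c))).map
        (fun c => (r, c)))
    = ((pvPairs grid).filter (fun p => q p.1)).map (fun p => p.2) := by
  unfold pvPairs
  simp [List.filter_flatMap, List.map_flatMap, List.filter_map, List.map_map,
    Function.comp_def]

theorem pvMem_pairs {grid : List (List Int)} {p : Int × (Int × Int)} (h : p ∈ pvPairs grid) :
    (0 ≤ p.2.1 ∧ p.2.1 < (grid.length : Int)) ∧ (0 ≤ p.2.2 ∧ p.2.2 < pvCols grid) := by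
  unfold pvPairs at h
  rw [List.mem_flatMap] at h
  obtain ⟨r, hr, h⟩ := h
  rw [List.mem_map] at h
  obtain ⟨c, hc, rfl⟩ := h
  rw [PySem.List.mem_pyRange_one] at hr hc
  simp only
  omega

theorem pvAPositions_eq (grid : List (List Int)) (k : Int) :
    aPositions grid k = pvPs grid k := by
  unfold pvPs
  have h := pvPairs_filterq grid (fun v => v == k)
  simp only [pvCols] at h
  exact h

theorem pvPs_length (grid : List (List Int)) (k : Int) :
    (pvPs grid k).length = (aCells grid).count k := by
  rw [pvPs, List.length_map, ← pvPairs_map_fst, List.count_eq_countP, List.countP_map,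
    ← List.countP_eq_length_filter]
  rfl

theorem pvPs_mem_bounds {grid : List (List Int)} {k : Int} {q : Int × Int}
    (h : q ∈ pvPs grid k) :
    (0 ≤ q.1 ∧ q.1 < (grid.length : Int)) ∧ (0 ≤ q.2 ∧ q.2 < pvCols grid) := by
  rw [pvPs, List.mem_map] at h
  obtain ⟨p, hp, rfl⟩ := h
  exact pvMem_pairs (List.mem_of_mem_filter hp)

theorem pvPs_mem_iff (grid : List (List Int)) (k : Int) (q : Int × Int) :
    q ∈ pvPs grid k ↔ (k, q) ∈ pvPairs grid := by
  rw [pvPs, List.mem_map]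
  constructor
  · rintro ⟨p, hp, rfl⟩
    rw [List.mem_filter] at hp
    have h1 : p.1 = k := by simpa using hp.2
    have : p = (k, p.2) := by
      cases p; simp_all
    rw [← this]
    exact hp.1
  · intro h
    exact ⟨(k, q), List.mem_filter.mpr ⟨h, by simp⟩, rfl⟩

theorem pvPs_ne_nil_of_mem {grid : List (List Int)} {k : Int}
    (h : k ∈ (aCells grid)) : pvPs grid k ≠ [] := by
  rw [← pvPairs_map_fst, List.mem_map] at h
  obtain ⟨p, hp, hk⟩ := h
  intro hnil
  have : p.2 ∈ pvPs grid k := by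
    rw [pvPs_mem_iff]
    have : p = (k, p.2) := by cases p; simp_all
    rw [← this]
    exact hp
  simp [hnil] at this

-- positions of all cells are pairwise distinct
theorem pvNodup_flatMap {α β : Type} (l : List α) (f : α → List β) (tag : β → α)
    (hl : l.Nodup) (hf : ∀ a, (f a).Nodup) (htag : ∀ a, ∀ b ∈ f a, tag b = a) :
    (l.flatMap f).Nodup := by
  induction l with
  | nil => simp
  | cons a t ih =>
    rw [List.flatMap_cons]
    rw [List.nodup_cons] at hl
    refine List.Nodup.append (hf a) (ih hl.2) ?_
    intro x hx hx'
    rw [List.mem_flatMap] at hx'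
    obtain ⟨a', ha', hxa'⟩ := hx'
    have h1 := htag a x hx
    have h2 := htag a' x hxa'
    exact hl.1 (h1 ▸ h2 ▸ ha')

theorem pvAllPos_nodup (grid : List (List Int)) :
    ((pvPairs grid).map (fun p => p.2)).Nodup := by
  have heq : (pvPairs grid).map (fun p => p.2) =
      (PySem.List.pyRange 0 (grid.length : Int)).flatMap (fun r =>
        (PySem.List.pyRange 0 (pvCols grid)).map (fun c => ((r, c) : Int × Int))) := by
    unfold pvPairs
    simp [List.map_flatMap, List.map_map, Function.comp_def]
  rw [heq]
  refine pvNodup_flatMap _ _ (fun q => q.1) (PySem.List.nodup_pyRange_one 0 _) ?_ ?_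
  · intro a
    exact (PySem.List.nodup_pyRange_one 0 _).map (by intro x y hxy; simpa using hxy)
  · intro a b hb
    rw [List.mem_map] at hb
    obtain ⟨c, _, rfl⟩ := hb
    rfl

theorem pvPs_nodup (grid : List (List Int)) (k : Int) : (pvPs grid k).Nodup := by
  rw [pvPs]
  have hsub : ((pvPairs grid).filter (fun p => p.1 == k)).Sublist (pvPairs grid) :=
    List.filter_sublist
  exact (List.Sublist.map (fun (p : Int × (Int × Int)) => p.2) hsub).nodup (pvAllPos_nodup grid)

-- ---- min / max folds ----
theorem pvFMin_spec (l : List Int) (a : Int) :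
    (pvFMin a l = a ∨ pvFMin a l ∈ l) ∧ pvFMin a l ≤ a ∧ ∀ y ∈ l, pvFMin a l ≤ y := by
  induction l generalizing a with
  | nil => simp [pvFMin]
  | cons x t ih =>
    have hstep : pvFMin a (x :: t) = pvFMin (if x < a then x else a) t := rfl
    rw [hstep]
    by_cases hx : x < a
    · rw [if_pos hx]
      obtain ⟨hmem, hle, hall⟩ := ih x
      refine ⟨?_, by omega, ?_⟩
      · rcases hmem with h | h
        · right; simp [h]
        · right; simp [h]
      · intro y hy
        rcases List.mem_cons.mp hy with rfl | hy'
        · omega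
        · exact hall y hy'
    · rw [if_neg hx]
      obtain ⟨hmem, hle, hall⟩ := ih a
      refine ⟨?_, hle, ?_⟩
      · rcases hmem with h | h
        · left; exact h
        · right; simp [h]
      · intro y hy
        rcases List.mem_cons.mp hy with rfl | hy'
        · omega
        · exact hall y hy'

theorem pvFMax_spec (l : List Int) (a : Int) :
    (pvFMax a l = a ∨ pvFMax a l ∈ l) ∧ a ≤ pvFMax a l ∧ ∀ y ∈ l, y ≤ pvFMax a l := by
  induction l generalizing a with
  | nil => simp [pvFMax]
  | cons x t ih =>
    have hstep : pvFMax a (x :: t) = pvFMax (if a < x then x else a) t := rfl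
    rw [hstep]
    by_cases hx : a < x
    · rw [if_pos hx]
      obtain ⟨hmem, hle, hall⟩ := ih x
      refine ⟨?_, by omega, ?_⟩
      · rcases hmem with h | h
        · right; simp [h]
        · right; simp [h]
      · intro y hy
        rcases List.mem_cons.mp hy with rfl | hy'
        · omega
        · exact hall y hy'
    · rw [if_neg hx]
      obtain ⟨hmem, hle, hall⟩ := ih a
      refine ⟨?_, hle, ?_⟩
      · rcases hmem with h | h
        · left; exact h
        · right; simp [h]
      · intro y hy
        rcases List.mem_cons.mp hy with rfl | hy'
        · omega
        · exact hall y hy'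

theorem pvMinL_spec {l : List Int} (h : l ≠ []) :
    pvMinL l ∈ l ∧ ∀ y ∈ l, pvMinL l ≤ y := by
  cases l with
  | nil => simp at h
  | cons x t =>
    obtain ⟨hmem, hle, hall⟩ := pvFMin_spec t x
    have hM : pvMinL (x :: t) = pvFMin x t := rfl
    rw [hM]
    refine ⟨?_, ?_⟩
    · rcases hmem with h' | h'
      · simp [h']
      · simp [h']
    · intro y hy
      rcases List.mem_cons.mp hy with rfl | hy'
      · exact hle
      · exact hall y hy'

theorem pvMaxL_spec {l : List Int} (h : l ≠ []) :
    pvMaxL l ∈ l ∧ ∀ y ∈ l, y ≤ pvMaxL l := by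
  cases l with
  | nil => simp at h
  | cons x t =>
    obtain ⟨hmem, hle, hall⟩ := pvFMax_spec t x
    have hM : pvMaxL (x :: t) = pvFMax x t := rfl
    rw [hM]
    refine ⟨?_, ?_⟩
    · rcases hmem with h' | h'
      · simp [h']
      · simp [h']
    · intro y hy
      rcases List.mem_cons.mp hy with rfl | hy'
      · exact hle
      · exact hall y hy'

theorem pvMinL_append {l : List Int} (y : Int) (h : l ≠ []) :
    pvMinL (l ++ [y]) = if y < pvMinL l then y else pvMinL l := by
  cases l with
  | nil => simp at h
  | cons x t =>
    show pvFMin x (t ++ [y]) = _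
    rw [pvFMin, List.foldl_append]
    rfl

theorem pvMaxL_append {l : List Int} (y : Int) (h : l ≠ []) :
    pvMaxL (l ++ [y]) = if pvMaxL l < y then y else pvMaxL l := by
  cases l with
  | nil => simp at h
  | cons x t =>
    show pvFMax x (t ++ [y]) = _
    rw [pvFMax, List.foldl_append]
    rfl

theorem pvMinL_lt_maxL {l : List Int} {u v : Int} (hu : u ∈ l) (hv : v ∈ l) (huv : u ≠ v) :
    pvMinL l < pvMaxL l := by
  have hne : l ≠ [] := by rintro rfl; simp at hu
  obtain ⟨_, hmin⟩ := pvMinL_spec hne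
  obtain ⟨_, hmax⟩ := pvMaxL_spec hne
  have h1 := hmin u hu
  have h2 := hmin v hv
  have h3 := hmax u hu
  have h4 := hmax v hv
  omega

-- ---- the closed form of pvStats ----
theorem pvOfList_append {x : Int} (l : List Int) :
    PySem.Set.ofList (l ++ [x]) = PySem.Set.add (PySem.Set.ofList l) x := by
  rw [PySem.Set.ofList_eq_foldl, PySem.Set.ofList_eq_foldl, List.foldl_append]
  rfl

theorem pvStats_append {ps : List (Int × Int)} (q : Int × Int) (h : ps ≠ []) :
    pvStats (ps ++ [q]) = bUpd (pvStats ps) q.1 q.2 := by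
  cases ps with
  | nil => simp at h
  | cons q0 t =>
    show (t ++ [q]).foldl (fun e q' => bUpd e q'.1 q'.2) (bInit q0.1 q0.2) = _
    rw [List.foldl_append]
    rfl

theorem pvStats_closed (q : Int × Int) (t : List (Int × Int)) :
    pvStats (q :: t) =
      (((q :: t).length : Int),
       PySem.Set.ofList ((q :: t).map (fun p => p.1)),
       PySem.Set.ofList ((q :: t).map (fun p => p.2)),
       pvMinL ((q :: t).map (fun p => p.1)), pvMaxL ((q :: t).map (fun p => p.1)),
       pvMinL ((q :: t).map (fun p => p.2)), pvMaxL ((q :: t).map (fun p => p.2))) := by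
  induction t using List.reverseRecOn with
  | nil =>
    show bInit q.1 q.2 = _
    simp [bInit, pvMinL, pvMaxL, pvFMin, pvFMax, PySem.Set.ofList]
  | append_singleton t p ih =>
    have hne : (q :: t) ≠ [] := by simp
    have hne1 : (q :: t).map (fun p => p.1) ≠ [] := by simp
    have hne2 : (q :: t).map (fun p => p.2) ≠ [] := by simp
    have h1 : q :: (t ++ [p]) = (q :: t) ++ [p] := by simp
    rw [h1, pvStats_append p hne, ih]
    have hm1 : ((q :: t) ++ [p]).map (fun p => p.1) = (q :: t).map (fun p => p.1) ++ [p.1] := by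
      simp
    have hm2 : ((q :: t) ++ [p]).map (fun p => p.2) = (q :: t).map (fun p => p.2) ++ [p.2] := by
      simp
    rw [bUpd]
    simp only [hm1, hm2, pvMinL_append _ hne1, pvMaxL_append _ hne1,
      pvMinL_append _ hne2, pvMaxL_append _ hne2, pvOfList_append]
    refine Prod.ext ?_ (Prod.ext rfl (Prod.ext rfl (Prod.ext rfl (Prod.ext rfl (Prod.ext rfl rfl)))))
    simp

theorem pvStats_count (ps : List (Int × Int)) : (pvStats ps).1 = (ps.length : Int) := by
  cases ps with
  | nil => rfl
  | cons q t => rw [pvStats_closed]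

theorem pvStats_minr {ps : List (Int × Int)} (h : ps ≠ []) :
    (pvStats ps).2.2.2.1 = pvMinL (ps.map (fun p => p.1)) := by
  cases ps with
  | nil => simp at h
  | cons q t => rw [pvStats_closed]

theorem pvStats_maxr {ps : List (Int × Int)} (h : ps ≠ []) :
    (pvStats ps).2.2.2.2.1 = pvMaxL (ps.map (fun p => p.1)) := by
  cases ps with
  | nil => simp at h
  | cons q t => rw [pvStats_closed]

theorem pvStats_minc {ps : List (Int × Int)} (h : ps ≠ []) :
    (pvStats ps).2.2.2.2.2.1 = pvMinL (ps.map (fun p => p.2)) := by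
  cases ps with
  | nil => simp at h
  | cons q t => rw [pvStats_closed]

theorem pvStats_maxc {ps : List (Int × Int)} (h : ps ≠ []) :
    (pvStats ps).2.2.2.2.2.2 = pvMaxL (ps.map (fun p => p.2)) := by
  cases ps with
  | nil => simp at h
  | cons q t => rw [pvStats_closed]

-- ---- bInfo ↔ position lists ----
theorem pvGI_spec (L : List (Int × (Int × Int))) :
    (pvGI L).keys = PySem.Set.ofList (L.map (fun p => p.1)) ∧
      ∀ k, (pvGI L).getD k bDef =
        pvStats ((L.filter (fun p => p.1 == k)).map (fun p => p.2)) := by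
  induction L using List.reverseRecOn with
  | nil =>
    constructor
    · simp [pvGI, PySem.Dict.keys_empty, PySem.Set.ofList]
    · intro k
      simp [pvGI, PySem.Dict.getD_empty, pvStats]
  | append_singleton L p ih =>
    obtain ⟨ihk, ihg⟩ := ih
    have hfold : pvGI (L ++ [p]) =
        (match (pvGI L).get? p.1 with
         | none => (pvGI L).insert p.1 (bInit p.2.1 p.2.2)
         | some e => (pvGI L).insert p.1 (bUpd e p.2.1 p.2.2)) := by
      conv_lhs => rw [pvGI, List.foldl_append]
      rfl
    have hmapf : (L ++ [p]).map (fun q => q.1) = L.map (fun q => q.1) ++ [p.1] := by simp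
    cases hget : (pvGI L).get? p.1 with
    | none =>
      have hcont : (pvGI L).contains p.1 = false :=
        (PySem.Dict.get?_eq_none_iff_contains _ _).mp hget
      have hnotkeys : p.1 ∉ (pvGI L).keys := by
        intro hmem
        have := (PySem.Dict.contains_iff_mem_keys _ _).mpr hmem
        rw [this] at hcont
        simp at hcont
      have hnotfst : p.1 ∉ L.map (fun q => q.1) := by
        rw [ihk, PySem.Set.mem_ofList] at hnotkeys
        exact hnotkeys
      have hstep' : pvGI (L ++ [p]) = (pvGI L).insert p.1 (bInit p.2.1 p.2.2) :=
        hfold.trans (by rw [hget])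
      constructor
      · rw [hstep', PySem.Dict.keys_insert_of_not_contains _ _ hcont, ihk, hmapf,
          pvOfList_append, PySem.Set.add]
        rw [if_neg ?_]
        simp only [PySem.Set.contains]
        intro hc
        exact hnotfst ((PySem.Set.mem_ofList _ _).mp (by
          have : p.1 ∈ PySem.Set.ofList (L.map (fun q => q.1)) := by
            simpa [List.contains_iff_mem] using hc
          exact this))
      · intro k
        rw [hstep']
        by_cases hk : k = p.1
        · subst hk
          rw [PySem.Dict.getD_insert_self]
          have hfil : L.filter (fun q => q.1 == p.1) = [] := by
            rw [List.filter_eq_nil_iff]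
            intro q hq hbeq
            exact hnotfst (by
              have : q.1 = p.1 := by simpa using hbeq
              rw [← this]
              exact List.mem_map_of_mem hq)
          rw [List.filter_append, hfil, List.nil_append]
          simp only [List.filter_cons, List.filter_nil]
          rw [if_pos (by simp)]
          rfl
        · rw [PySem.Dict.getD_insert_of_ne _ _ _ hk, ihg k, List.filter_append]
          have : [p].filter (fun q => q.1 == k) = [] := by
            simp only [List.filter_cons, List.filter_nil]
            rw [if_neg (by simp; exact fun h => hk h.symm)]
          rw [this, List.append_nil]
    | some e =>
      have hcont : (pvGI L).contains p.1 = true := by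
        by_contra hc
        have : (pvGI L).contains p.1 = false := by
          cases h : (pvGI L).contains p.1
          · rfl
          · exact absurd h hc
        rw [← PySem.Dict.get?_eq_none_iff_contains] at this
        rw [hget] at this
        exact Option.some_ne_none e this
      have hkeys : p.1 ∈ L.map (fun q => q.1) := by
        have := (PySem.Dict.contains_iff_mem_keys _ _).mp hcont
        rw [ihk, PySem.Set.mem_ofList] at this
        exact this
      have he : e = pvStats ((L.filter (fun q => q.1 == p.1)).map (fun q => q.2)) := by
        have := ihg p.1
        rw [PySem.Dict.getD, hget] at this
        simpa using this
      have hpsne : (L.filter (fun q => q.1 == p.1)).map (fun q => q.2) ≠ [] := by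
        rw [List.mem_map] at hkeys
        obtain ⟨q, hq, hq1⟩ := hkeys
        have hqf : q ∈ L.filter (fun q => q.1 == p.1) :=
          List.mem_filter.mpr ⟨hq, by simp [hq1]⟩
        intro hnil
        have : q.2 ∈ (L.filter (fun q => q.1 == p.1)).map (fun q => q.2) :=
          List.mem_map_of_mem hqf
        rw [hnil] at this
        simp at this
      have hstep' : pvGI (L ++ [p]) = (pvGI L).insert p.1 (bUpd e p.2.1 p.2.2) :=
        hfold.trans (by rw [hget])
      constructor
      · rw [hstep', PySem.Dict.keys_insert_of_contains _ _ hcont, ihk, hmapf,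
          pvOfList_append, PySem.Set.add]
        rw [if_pos ?_]
        simp only [PySem.Set.contains]
        rw [List.contains_iff_mem, PySem.Set.mem_ofList]
        exact hkeys
      · intro k
        rw [hstep']
        by_cases hk : k = p.1
        · subst hk
          rw [PySem.Dict.getD_insert_self, he, ← pvStats_append p.2 hpsne]
          rw [List.filter_append]
          simp only [List.filter_cons, List.filter_nil]
          rw [if_pos (by simp), List.map_append]
          rfl
        · rw [PySem.Dict.getD_insert_of_ne _ _ _ hk, ihg k, List.filter_append]
          have : [p].filter (fun q => q.1 == k) = [] := by
            simp only [List.filter_cons, List.filter_nil]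
            rw [if_neg (by simp; exact fun h => hk h.symm)]
          rw [this, List.append_nil]

theorem pvInfo_eq (grid : List (List Int)) : bInfo grid = pvGI (pvPairs grid) := by
  unfold bInfo pvGI pvPairs pvCols
  rw [pvFoldl_flatMap]
  have h : (fun (d : PySem.Dict Int BEnt) (r : Int) =>
      (PySem.List.pyRange 0 ((PySem.List.pyGetD grid 0 []).length : Int)).foldl (fun d c =>
        let v := PySem.List.pyGetD (PySem.List.pyGetD grid r []) c 0
        match d.get? v with
        | none => d.insert v (bInit r c)
        | some e => d.insert v (bUpd e r c)) d) =
      (fun (acc : PySem.Dict Int BEnt) (r : Int) =>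
      ((PySem.List.pyRange 0 ((PySem.List.pyGetD grid 0 []).length : Int)).map
        (fun c => (aVal grid r c, (r, c)))).foldl
        (fun d p =>
          match d.get? p.1 with
          | none => d.insert p.1 (bInit p.2.1 p.2.2)
          | some e => d.insert p.1 (bUpd e p.2.1 p.2.2)) acc) := by
    funext d r
    rw [List.foldl_map]
    rfl
  rw [h]

theorem pvInfo_keys (grid : List (List Int)) :
    (bInfo grid).keys = PySem.Set.ofList (aCells grid) := by
  rw [pvInfo_eq, (pvGI_spec (pvPairs grid)).1, pvPairs_map_fst]

theorem pvInfo_getD (grid : List (List Int)) (k : Int) :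
    (bInfo grid).getD k bDef = pvStats (pvPs grid k) := by
  rw [pvInfo_eq, (pvGI_spec (pvPairs grid)).2 k, pvPs]

theorem pvInfo_nodup (grid : List (List Int)) : (bInfo grid).keys.Nodup := by
  rw [pvInfo_keys]
  exact PySem.Set.nodup_ofList _

-- ---- background ----
theorem pvBg_eq (grid : List (List Int)) : aBg grid = bBg grid := by
  unfold aBg bBg
  rw [PySem.Dict.items_counter,
    pvMax?_map (fun k => (k, ((aCells grid).count k : Int))) (fun p => p.2), Option.map_map,
    pvInfo_keys]
  have hk : (fun k => ((bInfo grid).getD k bDef).1) =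
      fun k => (((aCells grid).count k : Nat) : Int) := by
    funext k
    rw [pvInfo_getD, pvStats_count, pvPs_length]
  rw [hk, pvMax?_cast]
  simp [Function.comp_def]

-- ---- marker search ----
-- a 4-element duplicate-free position list on 2 rows and 2 columns contains all 4 corners
theorem pvCorners {ps : List (Int × Int)} (hnd : ps.Nodup) (h4 : ps.length = 4)
    {a b x y : Int}
    (hR : PySem.Set.ofList (ps.map (fun p => p.1)) = [a, b])
    (hC : PySem.Set.ofList (ps.map (fun p => p.2)) = [x, y]) :
    ∀ r ∈ [a, b], ∀ c ∈ [x, y], (r, c) ∈ ps := by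
  have hab : a ≠ b := by
    have := PySem.Set.nodup_ofList (ps.map (fun p => p.1))
    rw [hR] at this
    simp at this
    exact this
  have hxy : x ≠ y := by
    have := PySem.Set.nodup_ofList (ps.map (fun p => p.2))
    rw [hC] at this
    simp at this
    exact this
  have hsub : ps ⊆ [(a, x), (a, y), (b, x), (b, y)] := by
    intro p hp
    have h1 : p.1 ∈ [a, b] := by
      rw [← hR, PySem.Set.mem_ofList]
      exact List.mem_map_of_mem hp
    have h2 : p.2 ∈ [x, y] := by
      rw [← hC, PySem.Set.mem_ofList]
      exact List.mem_map_of_mem hp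
    simp only [List.mem_cons, List.not_mem_nil, or_false] at h1 h2 ⊢
    rcases h1 with h1 | h1 <;> rcases h2 with h2 | h2 <;> (cases p; simp_all)
  have hSnd : ([(a, x), (a, y), (b, x), (b, y)] : List (Int × Int)).Nodup := by
    simp [List.nodup_cons, Prod.ext_iff, hab, hxy]
  have hsp : ps.Subperm [(a, x), (a, y), (b, x), (b, y)] := hnd.subperm hsub
  have hperm : ps.Perm [(a, x), (a, y), (b, x), (b, y)] := by
    apply hsp.perm_of_length_le
    simp [h4]
  intro r hr c hc
  rw [hperm.mem_iff]
  simp only [List.mem_cons, List.not_mem_nil, or_false] at hr hc ⊢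
  rcases hr with rfl | rfl <;> rcases hc with rfl | rfl <;> simp

theorem pvSorted_two {l : List Int} (hne : l ≠ []) (h2 : (PySem.Set.ofList l).length = 2) :
    PySem.List.sorted (PySem.Set.ofList l) (fun x => x) false = [pvMinL l, pvMaxL l] := by
  have hlen : (PySem.List.sorted (PySem.Set.ofList l) (fun x => x) false).length = 2 := by
    rw [PySem.List.length_sorted]
    exact h2
  obtain ⟨u, v, hs⟩ := List.length_eq_two.mp hlen
  have hpw := PySem.List.sorted_ofList_pairwise_lt (xs := l)
  rw [hs, List.pairwise_cons] at hpw
  have huv : u < v := hpw.1 v (by simp)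
  have hmem : ∀ z : Int, z ∈ PySem.List.sorted (PySem.Set.ofList l) (fun x => x) false ↔ z ∈ l := by
    intro z
    rw [PySem.List.mem_sorted, PySem.Set.mem_ofList]
  have hu : u ∈ l := (hmem u).mp (by rw [hs]; simp)
  have hv : v ∈ l := (hmem v).mp (by rw [hs]; simp)
  obtain ⟨hminm, hminle⟩ := pvMinL_spec hne
  obtain ⟨hmaxm, hmaxle⟩ := pvMaxL_spec hne
  have hmins : pvMinL l ∈ ([u, v] : List Int) := by rw [← hs, hmem]; exact hminm
  have hmaxs : pvMaxL l ∈ ([u, v] : List Int) := by rw [← hs, hmem]; exact hmaxm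
  have hminu : pvMinL l = u := by
    simp only [List.mem_cons, List.not_mem_nil, or_false] at hmins
    rcases hmins with h | h
    · exact h
    · have := hminle u hu
      omega
  have hmaxv : pvMaxL l = v := by
    simp only [List.mem_cons, List.not_mem_nil, or_false] at hmaxs
    rcases hmaxs with h | h
    · have := hmaxle v hv
      omega
    · exact h
  rw [hs, hminu, hmaxv]

theorem pvBool_ext {x y : Bool} (h : x = true ↔ y = true) : x = y := by
  cases x <;> cases y <;> simp_all

theorem pvQ_eq_QB (grid : List (List Int)) :
    ∀ k ∈ (bInfo grid).keys, pvQ grid k = pvQB grid k := by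
  intro k hk
  have hkc : k ∈ aCells grid := by
    rw [pvInfo_keys, PySem.Set.mem_ofList] at hk
    exact hk
  have hnd := pvPs_nodup grid k
  cases hps : pvPs grid k with
  | nil => exact absurd hps (pvPs_ne_nil_of_mem hkc)
  | cons q t =>
  rw [hps] at hnd
  have hcnt : ((aCells grid).count k : Int) = ((q :: t).length : Int) := by
    rw [← pvPs_length, hps]
  have hgetD : (bInfo grid).getD k bDef = pvStats (q :: t) := by rw [pvInfo_getD, hps]
  unfold pvQ pvRectA pvQB
  rw [pvAPositions_eq, hps, hgetD, pvStats_closed, hcnt]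
  dsimp only
  apply pvBool_ext
  simp only [Bool.and_eq_true, beq_iff_eq, PySem.Set.len, PySem.List.length_sorted]
  constructor
  · rintro ⟨h4, ⟨⟨h2r, h2c⟩, _⟩⟩
    refine ⟨⟨h4, by omega⟩, by omega⟩
  · rintro ⟨⟨h4, h2r⟩, h2c⟩
    have h4' : (q :: t).length = 4 := by omega
    have h2r' : (PySem.Set.ofList ((q :: t).map (fun p => p.1))).length = 2 := by omega
    have h2c' : (PySem.Set.ofList ((q :: t).map (fun p => p.2))).length = 2 := by omega
    refine ⟨h4, ⟨⟨h2r', h2c'⟩, ?_⟩⟩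
    obtain ⟨a, b, hR⟩ := List.length_eq_two.mp h2r'
    obtain ⟨x, y, hC⟩ := List.length_eq_two.mp h2c'
    have hcorner := pvCorners hnd h4' hR hC
    rw [List.all_eq_true]
    intro r hr
    rw [List.all_eq_true]
    intro c hc
    rw [PySem.List.mem_sorted, PySem.Set.mem_ofList] at hr hc
    have hr' : r ∈ ([a, b] : List Int) := by
      rw [← hR, PySem.Set.mem_ofList]
      exact hr
    have hc' : c ∈ ([x, y] : List Int) := by
      rw [← hC, PySem.Set.mem_ofList]
      exact hc
    have hmem := hcorner r hr' c hc'
    simp only [Prod.mk.eta, List.map_id']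
    rw [List.contains_iff_mem]
    simpa using hmem

theorem pvAFound?_eq (grid : List (List Int)) :
    aFound? grid = (((bInfo grid).keys).find? (pvQ grid)).map
      (fun k => (k, pvPs grid k)) := by
  unfold aFound?
  have hbody : aCheckBody grid = fun (p : Int × Int) =>
      if p.2 == 4 && pvRectA grid p.1 then some (p.1, aPositions grid p.1) else none := by
    funext p
    unfold aCheckBody pvRectA
    dsimp only
    exact pvIf_nest3 _ _ _ _
  rw [hbody, pvFindSome?_guard]
  have e1 : ∀ (l : List (Int × Int)),
      (l.filter (fun p => p.2 == 4)).find? (fun p => p.2 == 4 && pvRectA grid p.1) =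
        l.find? (fun p => p.2 == 4 && pvRectA grid p.1) := by
    intro l
    rw [pvFind?_filter]
    congr 1
    funext p
    rw [Bool.and_self_left]
  rw [← e1, pvFilter_sorted, e1, PySem.Dict.items_counter, List.find?_map,
    Option.map_map, pvInfo_keys]
  have hfind : (PySem.Set.ofList (aCells grid)).find?
      ((fun (p : Int × Int) => p.2 == 4 && pvRectA grid p.1) ∘
        (fun k => (k, ((aCells grid).count k : Int)))) =
      (PySem.Set.ofList (aCells grid)).find? (pvQ grid) := by
    apply pvFind?_congr
    intro k _
    rfl
  rw [hfind]
  congr 1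
  funext k
  simp only [Function.comp_apply, pvAPositions_eq]

theorem pvBMarker?_eq (grid : List (List Int)) :
    bMarker? grid = (((bInfo grid).keys).find? (pvQB grid)).map
      (fun k => (k, ((bInfo grid).getD k bDef).2.2.2)) := by
  unfold bMarker?
  rw [PySem.Dict.items_eq_map_keys (bInfo grid) (pvInfo_nodup grid) bDef,
    List.findSome?_map,
    ← pvFindSome?_guard (pvQB grid) (fun k => (k, ((bInfo grid).getD k bDef).2.2.2))]
  apply pvFindSome?_congr
  intro k _
  rfl

-- ---- bounding-box glue (no-marker branch) ----
theorem pvMax_glue (K : List Int) (rows : Int → List Int) (pool : List Int)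
    (hne : ∀ k ∈ K, rows k ≠ [])
    (hmem : ∀ x, x ∈ pool ↔ ∃ k ∈ K, x ∈ rows k) :
    PySem.List.max? (K.map (fun k => pvMaxL (rows k))) (fun x => x) =
      PySem.List.max? pool (fun x => x) := by
  cases hLB : PySem.List.max? (K.map (fun k => pvMaxL (rows k))) (fun x => x) with
  | none =>
    rw [PySem.List.max?_eq_none_iff] at hLB
    rw [List.map_eq_nil_iff] at hLB
    have : pool = [] := by
      rw [List.eq_nil_iff_forall_not_mem]
      intro x hx
      obtain ⟨k, hkK, _⟩ := (hmem x).mp hx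
      rw [hLB] at hkK
      simp at hkK
    rw [(PySem.List.max?_eq_none_iff pool (fun x => x)).mpr this]
  | some M =>
    have hM := PySem.List.max?_mem hLB
    rw [List.mem_map] at hM
    obtain ⟨k0, hk0, hMk0⟩ := hM
    have hMrows : M ∈ rows k0 := by
      rw [← hMk0]
      exact (pvMaxL_spec (hne k0 hk0)).1
    have hMpool : M ∈ pool := (hmem M).mpr ⟨k0, hk0, hMrows⟩
    cases hRB : PySem.List.max? pool (fun x => x) with
    | none =>
      rw [PySem.List.max?_eq_none_iff] at hRB
      rw [hRB] at hMpool
      simp at hMpool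
    | some N =>
      have h1 : M ≤ N := PySem.List.max?_isMax (key := fun x => x) hRB M hMpool
      have hN := PySem.List.max?_mem hRB
      obtain ⟨k1, hk1, hNk1⟩ := (hmem N).mp hN
      have h2a : N ≤ pvMaxL (rows k1) := (pvMaxL_spec (hne k1 hk1)).2 N hNk1
      have h2b : pvMaxL (rows k1) ≤ M :=
        PySem.List.max?_isMax (key := fun x => x) hLB _ (List.mem_map_of_mem hk1)
      have : M = N := by omega
      rw [this]

theorem pvMin_glue (K : List Int) (rows : Int → List Int) (pool : List Int)
    (hne : ∀ k ∈ K, rows k ≠ [])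
    (hmem : ∀ x, x ∈ pool ↔ ∃ k ∈ K, x ∈ rows k) :
    PySem.List.min? (K.map (fun k => pvMinL (rows k))) (fun x => x) =
      PySem.List.min? pool (fun x => x) := by
  cases hLB : PySem.List.min? (K.map (fun k => pvMinL (rows k))) (fun x => x) with
  | none =>
    rw [PySem.List.min?_eq_none_iff] at hLB
    rw [List.map_eq_nil_iff] at hLB
    have : pool = [] := by
      rw [List.eq_nil_iff_forall_not_mem]
      intro x hx
      obtain ⟨k, hkK, _⟩ := (hmem x).mp hx
      rw [hLB] at hkK
      simp at hkK
    rw [(PySem.List.min?_eq_none_iff pool (fun x => x)).mpr this]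
  | some M =>
    have hM := PySem.List.min?_mem hLB
    rw [List.mem_map] at hM
    obtain ⟨k0, hk0, hMk0⟩ := hM
    have hMrows : M ∈ rows k0 := by
      rw [← hMk0]
      exact (pvMinL_spec (hne k0 hk0)).1
    have hMpool : M ∈ pool := (hmem M).mpr ⟨k0, hk0, hMrows⟩
    cases hRB : PySem.List.min? pool (fun x => x) with
    | none =>
      rw [PySem.List.min?_eq_none_iff] at hRB
      rw [hRB] at hMpool
      simp at hMpool
    | some N =>
      have h1 : N ≤ M := PySem.List.min?_isMin (key := fun x => x) hRB M hMpool
      have hN := PySem.List.min?_mem hRB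
      obtain ⟨k1, hk1, hNk1⟩ := (hmem N).mp hN
      have h2a : pvMinL (rows k1) ≤ N := (pvMinL_spec (hne k1 hk1)).2 N hNk1
      have h2b : M ≤ pvMinL (rows k1) :=
        PySem.List.min?_isMin (key := fun x => x) hLB _ (List.mem_map_of_mem hk1)
      have : M = N := by omega
      rw [this]

-- ---- the marker-branch output loops: A's append loops vs B's slice/map comprehension ----
theorem pvLoop_eq (grid : List (List Int)) (mk : Int) (pattern? : Option Int)
    (r1 r2 c1 c2 : Int)
    (hrow : ∀ r : Int, r1 ≤ r → r < r2 + 1 → 0 ≤ r ∧ r < (grid.length : Int))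
    (hc1 : 0 ≤ c1) (hc12 : c1 ≤ c2 + 1) (hc2 : c2 + 1 ≤ pvCols grid)
    (hlen : ∀ row ∈ grid, (PySem.List.pyGetD grid 0 []).length ≤ row.length) :
    (PySem.List.pyRange r1 (r2 + 1)).foldl (fun out r =>
      out ++ [(PySem.List.pyRange c1 (c2 + 1)).foldl (fun row c =>
        if pattern? == some (aVal grid r c) then row ++ [mk] else row ++ [aVal grid r c]) []]) []
    = (PySem.List.pyRange r1 (r2 + 1)).map (fun r =>
      (PySem.List.slice (PySem.List.pyGetD grid r []) (some c1) (some (c2 + 1))).map (fun v =>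
        if pattern? == some v then mk else v)) := by
  rw [PySem.List.foldl_append_singleton_eq_map]
  simp only [List.nil_append]
  apply List.map_congr_left
  intro r hr
  rw [PySem.List.mem_pyRange_one] at hr
  obtain ⟨hr0, hrlt⟩ := hrow r hr.1 hr.2
  have hinner := PySem.List.foldl_congr_mem (PySem.List.pyRange c1 (c2 + 1))
    (fun row c => if pattern? == some (aVal grid r c) then row ++ [mk] else row ++ [aVal grid r c])
    (fun row c => row ++ [if pattern? == some (aVal grid r c) then mk else aVal grid r c])
    ([] : List Int)
    (by intro acc x _
        by_cases h : (pattern? == some (aVal grid r x)) = true <;> simp [h])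
  rw [hinner, PySem.List.foldl_append_singleton_eq_map]
  simp only [List.nil_append]
  have hrowmem : PySem.List.pyGetD grid r [] ∈ grid := by
    rw [PySem.List.pyGetD_eq_getElem grid [] hr0 hrlt]
    exact List.getElem_mem _
  have hrl : c2 + 1 ≤ ((PySem.List.pyGetD grid r []).length : Int) := by
    have := hlen _ hrowmem
    unfold pvCols at hc2
    omega
  rw [pvSlice_eq_map _ c1 (c2 + 1) hc1 hc12 hrl, List.map_map]
  apply List.map_congr_left
  intro c _
  simp [aVal]

-- ===== VERDICT (by name: the statement is the Claim_ definition above) =====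
theorem transform_spec : Claim_equal_transform := by
  intro grid _hDom hpre
  obtain ⟨hgne, hcols0, hrowlen⟩ := hpre
  unfold Spec_transform transform transform_alt
  simp only [pvAFound?_eq, pvBMarker?_eq, pvBg_eq, PySem.Dict.keys_counter, ← pvInfo_keys]
  rw [pvFind?_congr ((bInfo grid).keys) (pvQ_eq_QB grid)]
  cases hf : ((bInfo grid).keys).find? (pvQB grid) with
  | none =>
    simp only [Option.map_none]
    -- both take the no-marker branch
    have hA := pvPairs_filterq grid (fun v => !(v == bBg grid))
    simp only [pvCols] at hA
    rw [hA, PySem.Dict.items_eq_map_keys (bInfo grid) (pvInfo_nodup grid) bDef]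
    have e0 : ((((bInfo grid).keys).map (fun k => (k, (bInfo grid).getD k bDef))).filter
          (fun p => !(p.1 == bBg grid))).map (fun p => p.2) =
        (((bInfo grid).keys).filter (fun k => !(k == bBg grid))).map
          (fun k => (bInfo grid).getD k bDef) := by
      rw [List.filter_map, List.map_map]
      rfl
    rw [e0]
    have hKFkeys : ∀ k ∈ ((bInfo grid).keys).filter (fun k => !(k == bBg grid)),
        k ∈ aCells grid := by
      intro k hk
      rw [List.mem_filter] at hk
      have := hk.1
      rw [pvInfo_keys, PySem.Set.mem_ofList] at this
      exact this
    have hpsne : ∀ k ∈ ((bInfo grid).keys).filter (fun k => !(k == bBg grid)),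
        pvPs grid k ≠ [] := by
      intro k hk
      exact pvPs_ne_nil_of_mem (hKFkeys k hk)
    have hmemG : ∀ (f : Int × Int → Int) (x : Int),
        (x ∈ (((pvPairs grid).filter (fun p => !(p.1 == bBg grid))).map
            (fun p => p.2)).map f ↔
          ∃ k ∈ ((bInfo grid).keys).filter (fun k => !(k == bBg grid)),
            x ∈ (pvPs grid k).map f) := by
      intro f x
      constructor
      · intro hx
        rw [List.map_map, List.mem_map] at hx
        obtain ⟨p, hp, rfl⟩ := hx
        rw [List.mem_filter] at hp
        refine ⟨p.1, List.mem_filter.mpr ⟨?_, hp.2⟩, ?_⟩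
        · rw [pvInfo_keys, PySem.Set.mem_ofList, ← pvPairs_map_fst]
          exact List.mem_map_of_mem hp.1
        · rw [List.mem_map]
          refine ⟨p.2, ?_, rfl⟩
          rw [pvPs_mem_iff]
          exact hp.1
      · rintro ⟨k, hkKF, hx⟩
        rw [List.mem_filter] at hkKF
        rw [List.mem_map] at hx
        obtain ⟨qq, hqq, rfl⟩ := hx
        rw [pvPs_mem_iff] at hqq
        rw [List.map_map, List.mem_map]
        exact ⟨(k, qq), List.mem_filter.mpr ⟨hqq, hkKF.2⟩, rfl⟩
    have hiff : ((((bInfo grid).keys).filter (fun k => !(k == bBg grid))).map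
          (fun k => (bInfo grid).getD k bDef)).isEmpty =
        (((pvPairs grid).filter (fun p => !(p.1 == bBg grid))).map
          (fun p => p.2)).isEmpty := by
      apply pvBool_ext
      simp only [List.isEmpty_iff, List.map_eq_nil_iff]
      constructor
      · intro hKF
        rw [List.eq_nil_iff_forall_not_mem]
        intro p hp
        have hpr := List.mem_filter.mp hp
        have hk : p.1 ∈ ((bInfo grid).keys).filter (fun k => !(k == bBg grid)) := by
          refine List.mem_filter.mpr ⟨?_, hpr.2⟩
          rw [pvInfo_keys, PySem.Set.mem_ofList, ← pvPairs_map_fst]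
          exact List.mem_map_of_mem hpr.1
        rw [hKF] at hk
        simp at hk
      · intro hNB
        rw [List.eq_nil_iff_forall_not_mem]
        intro k hk
        obtain ⟨qq, hqq⟩ := List.exists_mem_of_ne_nil _ (hpsne k hk)
        have hpairs : (k, qq) ∈ pvPairs grid := (pvPs_mem_iff grid k qq).mp hqq
        have hmemf : (k, qq) ∈ (pvPairs grid).filter (fun p => !(p.1 == bBg grid)) :=
          List.mem_filter.mpr ⟨hpairs, (List.mem_filter.mp hk).2⟩
        rw [hNB] at hmemf
        simp at hmemf
    rw [hiff]
    cases he : (((pvPairs grid).filter (fun p => !(p.1 == bBg grid))).map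
        (fun p => p.2)).isEmpty with
    | true =>
      simp only [Bool.not_true, Bool.false_eq_true, if_false]
      apply List.map_congr_left
      intro row _
      rw [pvSlice_none_none]
    | false =>
      simp only [Bool.not_false, if_true]
      have hglue : ∀ (f : Int × Int → Int),
          (∀ k ∈ ((bInfo grid).keys).filter (fun k => !(k == bBg grid)),
            (pvPs grid k).map f ≠ []) := by
        intro f k hk
        simpa using hpsne k hk
      have eMaxR : PySem.List.max?
            (((((bInfo grid).keys).filter (fun k => !(k == bBg grid))).map
              (fun k => (bInfo grid).getD k bDef)).map (fun e => e.2.2.2.2.1)) (fun x => x) =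
          PySem.List.max? ((((pvPairs grid).filter (fun p => !(p.1 == bBg grid))).map
            (fun p => p.2)).map (fun q => q.1)) (fun x => x) := by
        rw [List.map_map]
        have hproj : (((bInfo grid).keys).filter (fun k => !(k == bBg grid))).map
              ((fun (e : BEnt) => e.2.2.2.2.1) ∘ (fun k => (bInfo grid).getD k bDef)) =
            (((bInfo grid).keys).filter (fun k => !(k == bBg grid))).map
              (fun k => pvMaxL ((pvPs grid k).map (fun p => p.1))) := by
          apply List.map_congr_left
          intro k hk
          simp only [Function.comp_apply]
          rw [pvInfo_getD, pvStats_maxr (hpsne k hk)]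
        rw [hproj, pvMax_glue _ _ _ (hglue (fun p => p.1)) (fun x => hmemG (fun p => p.1) x)]
      have eMinR : PySem.List.min?
            (((((bInfo grid).keys).filter (fun k => !(k == bBg grid))).map
              (fun k => (bInfo grid).getD k bDef)).map (fun e => e.2.2.2.1)) (fun x => x) =
          PySem.List.min? ((((pvPairs grid).filter (fun p => !(p.1 == bBg grid))).map
            (fun p => p.2)).map (fun q => q.1)) (fun x => x) := by
        rw [List.map_map]
        have hproj : (((bInfo grid).keys).filter (fun k => !(k == bBg grid))).map
              ((fun (e : BEnt) => e.2.2.2.1) ∘ (fun k => (bInfo grid).getD k bDef)) =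
            (((bInfo grid).keys).filter (fun k => !(k == bBg grid))).map
              (fun k => pvMinL ((pvPs grid k).map (fun p => p.1))) := by
          apply List.map_congr_left
          intro k hk
          simp only [Function.comp_apply]
          rw [pvInfo_getD, pvStats_minr (hpsne k hk)]
        rw [hproj, pvMin_glue _ _ _ (hglue (fun p => p.1)) (fun x => hmemG (fun p => p.1) x)]
      have eMaxC : PySem.List.max?
            (((((bInfo grid).keys).filter (fun k => !(k == bBg grid))).map
              (fun k => (bInfo grid).getD k bDef)).map (fun e => e.2.2.2.2.2.2)) (fun x => x) =
          PySem.List.max? ((((pvPairs grid).filter (fun p => !(p.1 == bBg grid))).map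
            (fun p => p.2)).map (fun q => q.2)) (fun x => x) := by
        rw [List.map_map]
        have hproj : (((bInfo grid).keys).filter (fun k => !(k == bBg grid))).map
              ((fun (e : BEnt) => e.2.2.2.2.2.2) ∘ (fun k => (bInfo grid).getD k bDef)) =
            (((bInfo grid).keys).filter (fun k => !(k == bBg grid))).map
              (fun k => pvMaxL ((pvPs grid k).map (fun p => p.2))) := by
          apply List.map_congr_left
          intro k hk
          simp only [Function.comp_apply]
          rw [pvInfo_getD, pvStats_maxc (hpsne k hk)]
        rw [hproj, pvMax_glue _ _ _ (hglue (fun p => p.2)) (fun x => hmemG (fun p => p.2) x)]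
      have eMinC : PySem.List.min?
            (((((bInfo grid).keys).filter (fun k => !(k == bBg grid))).map
              (fun k => (bInfo grid).getD k bDef)).map (fun e => e.2.2.2.2.2.1)) (fun x => x) =
          PySem.List.min? ((((pvPairs grid).filter (fun p => !(p.1 == bBg grid))).map
            (fun p => p.2)).map (fun q => q.2)) (fun x => x) := by
        rw [List.map_map]
        have hproj : (((bInfo grid).keys).filter (fun k => !(k == bBg grid))).map
              ((fun (e : BEnt) => e.2.2.2.2.2.1) ∘ (fun k => (bInfo grid).getD k bDef)) =
            (((bInfo grid).keys).filter (fun k => !(k == bBg grid))).map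
              (fun k => pvMinL ((pvPs grid k).map (fun p => p.2))) := by
          apply List.map_congr_left
          intro k hk
          simp only [Function.comp_apply]
          rw [pvInfo_getD, pvStats_minc (hpsne k hk)]
        rw [hproj, pvMin_glue _ _ _ (hglue (fun p => p.2)) (fun x => hmemG (fun p => p.2) x)]
      rw [eMaxR, eMinR, eMaxC, eMinC]
  | some k =>
    simp only [Option.map_some]
    have hkq : pvQB grid k = true := List.find?_some hf
    have hkmem : k ∈ (bInfo grid).keys := List.mem_of_find?_eq_some hf
    have hkc : k ∈ aCells grid := by
      rw [pvInfo_keys, PySem.Set.mem_ofList] at hkmem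
      exact hkmem
    cases hps : pvPs grid k with
    | nil => exact absurd hps (pvPs_ne_nil_of_mem hkc)
    | cons q t =>
    unfold pvQB at hkq
    rw [pvInfo_getD, hps, pvStats_closed] at hkq ⊢
    dsimp only at hkq ⊢
    simp only [Bool.and_eq_true, beq_iff_eq, PySem.Set.len] at hkq
    obtain ⟨⟨h4, h2r⟩, h2c⟩ := hkq
    have hrne : (q :: t).map (fun p => p.1) ≠ [] := by simp
    have hcne : (q :: t).map (fun p => p.2) ≠ [] := by simp
    have h2r' : (PySem.Set.ofList ((q :: t).map (fun p => p.1))).length = 2 := by omega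
    have h2c' : (PySem.Set.ofList ((q :: t).map (fun p => p.2))).length = 2 := by omega
    have hsr := pvSorted_two hrne h2r'
    have hsc := pvSorted_two hcne h2c'
    rw [hsr, hsc]
    simp only [PySem.List.pyGetD_ofNat', List.getD_cons_zero, List.getD_cons_succ]
    -- distinct rows / columns
    obtain ⟨a, b, hR⟩ := List.length_eq_two.mp h2r'
    obtain ⟨x, y, hC⟩ := List.length_eq_two.mp h2c'
    have hab : a ≠ b := by
      have := PySem.Set.nodup_ofList ((q :: t).map (fun p => p.1))
      rw [hR] at this
      simp at this
      exact this
    have hxy : x ≠ y := by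
      have := PySem.Set.nodup_ofList ((q :: t).map (fun p => p.2))
      rw [hC] at this
      simp at this
      exact this
    have haR : a ∈ (q :: t).map (fun p => p.1) := by
      rw [← PySem.Set.mem_ofList (xs := (q :: t).map (fun p => p.1)), hR]; simp
    have hbR : b ∈ (q :: t).map (fun p => p.1) := by
      rw [← PySem.Set.mem_ofList (xs := (q :: t).map (fun p => p.1)), hR]; simp
    have hxC : x ∈ (q :: t).map (fun p => p.2) := by
      rw [← PySem.Set.mem_ofList (xs := (q :: t).map (fun p => p.2)), hC]; simp
    have hyC : y ∈ (q :: t).map (fun p => p.2) := by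
      rw [← PySem.Set.mem_ofList (xs := (q :: t).map (fun p => p.2)), hC]; simp
    have hltR : pvMinL ((q :: t).map (fun p => p.1)) < pvMaxL ((q :: t).map (fun p => p.1)) :=
      pvMinL_lt_maxL haR hbR hab
    have hltC : pvMinL ((q :: t).map (fun p => p.2)) < pvMaxL ((q :: t).map (fun p => p.2)) :=
      pvMinL_lt_maxL hxC hyC hxy
    -- coordinate bounds
    have hboundsR : ∀ r ∈ (q :: t).map (fun p => p.1), 0 ≤ r ∧ r < (grid.length : Int) := by
      intro r hr
      rw [List.mem_map] at hr
      obtain ⟨p, hp, rfl⟩ := hr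
      exact (pvPs_mem_bounds (hps ▸ hp : p ∈ pvPs grid k)).1
    have hboundsC : ∀ c ∈ (q :: t).map (fun p => p.2), 0 ≤ c ∧ c < pvCols grid := by
      intro c hc
      rw [List.mem_map] at hc
      obtain ⟨p, hp, rfl⟩ := hc
      exact (pvPs_mem_bounds (hps ▸ hp : p ∈ pvPs grid k)).2
    obtain ⟨hminRmem, -⟩ := pvMinL_spec hrne
    obtain ⟨hmaxRmem, -⟩ := pvMaxL_spec hrne
    obtain ⟨hminCmem, -⟩ := pvMinL_spec hcne
    obtain ⟨hmaxCmem, -⟩ := pvMaxL_spec hcne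
    have hminR0 := hboundsR _ hminRmem
    have hmaxRlt := hboundsR _ hmaxRmem
    have hminC0 := hboundsC _ hminCmem
    have hmaxClt := hboundsC _ hmaxCmem
    apply pvLoop_eq grid k _
      (pvMinL ((q :: t).map (fun p => p.1)) + 1) (pvMaxL ((q :: t).map (fun p => p.1)) - 1)
      (pvMinL ((q :: t).map (fun p => p.2)) + 1) (pvMaxL ((q :: t).map (fun p => p.2)) - 1)
    · intro r hr1 hr2
      omega
    · omega
    · omega
    · unfold pvCols at hmaxClt ⊢
      omega
    · exact hrowlen
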